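-- pv_equiv track=rewrite | github.com/raphy0316/basketball-form-analyzer | shooting_comparison/analysis_pipline.py | extract_phase_data
-- ===== SOURCE A (Python) =====
-- from typing import List, Dict, Optional, Tuple
--
-- def extract_phase_data(data: Dict) -> Dict[str, List[Dict]]:
--     """
--     Extract frames grouped by phases
--
--     Args:
--         data: Video analysis results
--
--     Returns:
--         Dictionary with phase names as keys and frame lists as values
--     """
--     phase_data = {}
--     frames = data.get('frames', [])
--
--     for frame in frames:
--         phase = frame.get('phase', 'Unknown')
--         if phase not in phase_data:
--             phase_data[phase] = []
--         phase_data[phase].append(frame)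
--
--     return phase_data
-- ===== SOURCE B (Python) =====
-- def extract_phase_data(data):
--     frames = data.get('frames', [])
--     phases = dict.fromkeys(f.get('phase', 'Unknown') for f in frames)
--     return {p: [f for f in frames if f.get('phase', 'Unknown') == p]
--             for p in phases}
-- ===== Notes on version B (the rewrite author's own statement) =====
-- stated objective: alternative
-- what changed: Instead of one accumulating pass that grows per-phase lists in a dict, B first computes the distinct phases in first-appearance order with dict.fromkeys and then builds the result by one filtering scan of the frames per phase.
import Mathlib
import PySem

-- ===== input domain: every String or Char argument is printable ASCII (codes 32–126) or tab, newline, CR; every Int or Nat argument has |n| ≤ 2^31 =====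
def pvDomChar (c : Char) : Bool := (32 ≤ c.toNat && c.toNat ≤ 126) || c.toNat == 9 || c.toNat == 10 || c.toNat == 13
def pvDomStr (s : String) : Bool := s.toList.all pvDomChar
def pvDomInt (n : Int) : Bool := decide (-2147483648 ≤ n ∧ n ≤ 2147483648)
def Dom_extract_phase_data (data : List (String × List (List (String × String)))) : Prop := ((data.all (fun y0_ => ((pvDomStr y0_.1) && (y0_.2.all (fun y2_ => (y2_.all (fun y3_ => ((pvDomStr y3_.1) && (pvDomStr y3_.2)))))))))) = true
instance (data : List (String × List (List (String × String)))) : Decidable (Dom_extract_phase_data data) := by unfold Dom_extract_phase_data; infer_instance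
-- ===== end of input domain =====

-- B groups the frames by a different decomposition: distinct phases first (dict.fromkeys),
-- then one filtering scan of the frames per phase, instead of A's single accumulating dict pass.

-- ===== PORT A =====
-- frame.get('phase', 'Unknown')
def pvPhase (frame : List (String × String)) : String :=
  PySem.Dict.getD (PySem.Dict.mk frame) "phase" "Unknown"

def extract_phase_data (data : List (String × List (List (String × String)))) : List (String × List (List (String × String))) :=
  let frames := PySem.Dict.getD (PySem.Dict.mk data) "frames" []
  let phase_data := frames.foldl
    (fun d frame =>
      let phase := pvPhase frame
      let d := if d.contains phase then d else d.insert phase []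
      d.insert phase (d.getD phase [] ++ [frame]))
    PySem.Dict.empty
  phase_data.items

-- ===== PORT B =====
def extract_phase_data_alt (data : List (String × List (List (String × String)))) : List (String × List (List (String × String))) :=
  let frames := PySem.Dict.getD (PySem.Dict.mk data) "frames" []
  let phases := PySem.List.dedup (frames.map (fun f => pvPhase f))
  phases.map (fun p => (p, frames.filter (fun f => pvPhase f == p)))

-- ===== PRECONDITION & SPEC =====
def Spec_extract_phase_data (data : List (String × List (List (String × String)))) (out : List (String × List (List (String × String)))) : Prop := out = extract_phase_data_alt data
instance (data : List (String × List (List (String × String)))) (out : List (String × List (List (String × String)))) : Decidable (Spec_extract_phase_data data out) := by unfold Spec_extract_phase_data; infer_instance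

-- ===== CLAIM (what is proved, stated in full; the proofs are below) =====
def Claim_equal_extract_phase_data : Prop := ∀ (data : List (String × List (List (String × String)))), Dom_extract_phase_data data → Spec_extract_phase_data data (extract_phase_data data)

-- ===== LEMMAS AND PROOFS =====

-- A's loop body equals a single dict.modify appending the frame at the frame's phase.
theorem pv_stepA_eq (d : PySem.Dict String (List (List (String × String)))) (f : List (String × String)) :
    (let phase := pvPhase f
     let d := if d.contains phase then d else d.insert phase []
     d.insert phase (d.getD phase [] ++ [f]))
    = d.modify (pvPhase f) [] (· ++ [f]) := by
  by_cases h : d.contains (pvPhase f)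
  · simp only [h, if_true, PySem.Dict.modify]
  · simp only [h, if_false, Bool.false_eq_true, PySem.Dict.insert_insert_self,
      PySem.Dict.getD_insert_self, PySem.Dict.modify,
      PySem.Dict.getD_of_not_contains _ _ (by simpa using h)]

theorem pv_foldl_eq (frames : List (List (String × String))) (d : PySem.Dict String (List (List (String × String)))) :
    frames.foldl
      (fun d frame =>
        let phase := pvPhase frame
        let d := if d.contains phase then d else d.insert phase []
        d.insert phase (d.getD phase [] ++ [frame])) d
    = frames.foldl (fun d frame => d.modify (pvPhase frame) [] (· ++ [frame])) d := by
  induction frames generalizing d with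
  | nil => rfl
  | cons f fs ih => rw [List.foldl_cons, List.foldl_cons, pv_stepA_eq]; exact ih _

-- ===== VERDICT =====
-- A's dict, viewed as the standard pair-grouping loop: keys, nodup, and per-key contents.
theorem extract_phase_data_spec : Claim_equal_extract_phase_data := by
  intro data _
  show (((PySem.Dict.getD (PySem.Dict.mk data) "frames" []).foldl
      (fun d frame =>
        let phase := pvPhase frame
        let d := if d.contains phase then d else d.insert phase []
        d.insert phase (d.getD phase [] ++ [frame])) PySem.Dict.empty).items)
    = (PySem.List.dedup ((PySem.Dict.getD (PySem.Dict.mk data) "frames" []).map (fun f => pvPhase f))).map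
        (fun p => (p, (PySem.Dict.getD (PySem.Dict.mk data) "frames" []).filter (fun f => pvPhase f == p)))
  set frames := PySem.Dict.getD (PySem.Dict.mk data) "frames" [] with hf
  rw [pv_foldl_eq]
  have hpair : frames.foldl (fun d frame => d.modify (pvPhase frame) [] (· ++ [frame])) PySem.Dict.empty
      = (frames.map (fun f => (pvPhase f, f))).foldl
          (fun d p => d.modify p.1 [] (· ++ [p.2])) PySem.Dict.empty := by
    rw [List.foldl_map]
  rw [hpair]
  set D := (frames.map (fun f => (pvPhase f, f))).foldl
      (fun d p => d.modify p.1 [] (· ++ [p.2])) PySem.Dict.empty with hD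
  have hnd : D.keys.Nodup := by
    rw [hD]
    exact PySem.Dict.nodup_keys_foldl_modify_key _ Prod.fst [] _ _ PySem.Dict.nodup_keys_empty
  have hkeys : D.keys = PySem.List.dedup (frames.map (fun f => pvPhase f)) := by
    rw [hD, PySem.Dict.keys_foldl_modify_key]
    simp [PySem.Dict.keys_empty, PySem.List.dedup_eq_ofList, PySem.Set.ofList,
      PySem.Set.update, List.map_map, Function.comp_def]
  rw [PySem.Dict.items_eq_map_keys D hnd [], hkeys]
  refine List.map_congr_left ?_
  intro k _
  have hget : D.getD k [] = frames.filter (fun f => pvPhase f == k) := by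
    rw [hD, PySem.Dict.getD_foldl_modify_append]
    simp [PySem.Dict.getD_empty, List.filter_map, Function.comp_def]
  simp [hget]
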